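-- pv_equiv track=rewrite | github.com/khalidomari/ML_Project2-Tweet-Sentiment-Analysis | script/spell_check.py | correct_char_repetition
-- ===== SOURCE A (Python) =====
-- from itertools import groupby
--
-- def correct_char_repetition(word):
--     word = word.lower()
--     occurance = [(k, sum(1 for i in g)) for k,g in groupby(word)]
--     if len(occurance)==1:
--         return word
--     if max([j for (_,j) in occurance]) > 2:
--         corrected_word = ''
--         for (i,j) in occurance:
--             if j>2:
--                 corrected_word += 2*i
--             else:
--                 corrected_word += i*j
--         return corrected_word
--     else:
--         return word
-- ===== SOURCE B (Python) =====
-- def correct_char_repetition(word):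
--     word = word.lower()
--     if len(set(word)) <= 1:
--         # zero or one distinct character: a single run, returned unchanged (as the
--         # original's len(occurance)==1 branch does)
--         return word
--     out = []
--     prev = None
--     run = 0
--     for ch in word:
--         run = run + 1 if ch == prev else 1
--         prev = ch
--         if run <= 2:
--             out.append(ch)
--     return ''.join(out)
-- ===== Notes on version B (the rewrite author's own statement) =====
-- stated objective: simpler
-- what changed: Replaces the groupby-count, max-scan and rebuild passes over the run list by a distinct-character short-circuit plus a single forward pass that tracks the current run length and copies each character only while the run is at most 2 (one pass, no intermediate run list).
import Mathlib
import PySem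

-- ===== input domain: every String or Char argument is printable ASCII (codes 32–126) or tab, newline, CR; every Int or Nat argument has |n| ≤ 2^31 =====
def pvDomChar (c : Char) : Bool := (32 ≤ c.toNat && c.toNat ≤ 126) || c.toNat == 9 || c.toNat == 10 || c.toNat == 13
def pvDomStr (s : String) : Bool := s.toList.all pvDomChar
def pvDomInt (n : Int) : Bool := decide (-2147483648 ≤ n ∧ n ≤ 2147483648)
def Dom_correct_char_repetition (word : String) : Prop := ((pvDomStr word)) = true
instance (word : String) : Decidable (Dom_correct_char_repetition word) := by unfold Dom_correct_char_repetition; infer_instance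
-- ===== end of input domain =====

-- B replaces A's groupby+max+rebuild passes over the run list by a distinct-character
-- short-circuit plus one forward scan with a run counter (simpler); equal on every non-empty word.

-- ===== PORT A =====
-- itertools.groupby with the per-group count sum(1 for i in g), ported as a fold building the run list
def pvGrpStep (c : Char) (acc : List (Char × Int)) : List (Char × Int) :=
  match acc with
  | (c', n) :: t => if c = c' then (c', n + 1) :: t else (c, 1) :: (c', n) :: t
  | [] => [(c, 1)]

def pvGroupby (l : List Char) : List (Char × Int) := l.foldr pvGrpStep []

def correct_char_repetition (word : String) : String :=
  let w := PySem.Str.lower word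
  let occ := pvGroupby w.toList
  if occ.length == 1 then w
  else
    match PySem.List.max? (occ.map (fun p => p.2)) (fun x => x) with
    | none => w   -- Python: max([]) raises ValueError here; excluded by Pre_
    | some m =>
      if m > 2 then
        String.ofList (occ.foldl
          (fun acc p => acc ++ (if p.2 > 2 then [p.1, p.1] else List.replicate p.2.toNat p.1)) [])
      else w

-- ===== PORT B =====
-- loop body of Source B: update the run counter, keep the char while the run is at most 2
def altStep (st : List Char × Option Char × Nat) (ch : Char) : List Char × Option Char × Nat :=
  let run := if some ch = st.2.1 then st.2.2 + 1 else 1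
  (st.1 ++ (if run ≤ 2 then [ch] else []), some ch, run)

def correct_char_repetition_alt (word : String) : String :=
  let w := PySem.Str.lower word
  if (PySem.Set.ofList w.toList).length ≤ 1 then w
  else String.ofList (w.toList.foldl altStep ([], none, 0)).1

-- ===== PRECONDITION & SPEC =====
-- Pre_ excludes only the empty string, on which A raises ValueError (max of an empty list).
def Pre_correct_char_repetition (word : String) : Prop := word ≠ ""
instance (word : String) : Decidable (Pre_correct_char_repetition word) := by
  unfold Pre_correct_char_repetition; infer_instance
def pvWitness_correct_char_repetition : String := "abc"

def Spec_correct_char_repetition (word : String) (out : String) : Prop :=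
  out = correct_char_repetition_alt word
instance (word : String) (out : String) : Decidable (Spec_correct_char_repetition word out) := by
  unfold Spec_correct_char_repetition; infer_instance

-- ===== CLAIM (what is proved, stated in full; the proofs are below) =====
def Claim_equal_correct_char_repetition : Prop := ∀ (word : String), Dom_correct_char_repetition word → Pre_correct_char_repetition word → Spec_correct_char_repetition word (correct_char_repetition word)

-- ===== LEMMAS AND PROOFS =====

-- the capped scan of B, written as structural recursion carrying the (previous char, run length) context
def capC : Option Char → Nat → List Char → List Char
  | _, _, [] => []
  | p, r, c :: t =>
    (if (if some c = p then r + 1 else 1) ≤ 2 then [c] else []) ++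
      capC (some c) (if some c = p then r + 1 else 1) t

def leadCount (c : Char) : List Char → Nat
  | [] => 0
  | d :: t => if d = c then leadCount c t + 1 else 0

-- the run list, in forward take/drop form (proof-side mirror of pvGroupby)
def runsA : List Char → List (Char × Int)
  | [] => []
  | c :: t => (c, (leadCount c t : Int) + 1) :: runsA (t.drop (leadCount c t))
termination_by l => l.length
decreasing_by simp

def cap2 (p : Char × Int) : List Char :=
  if p.2 > 2 then [p.1, p.1] else List.replicate p.2.toNat p.1

theorem lead_decomp (c : Char) (t : List Char) :
    List.replicate (leadCount c t) c ++ t.drop (leadCount c t) = t := by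
  induction t with
  | nil => simp [leadCount]
  | cons d t ih =>
    by_cases h : d = c
    · subst h; simpa [leadCount, List.replicate_succ] using ih
    · simp [leadCount, h]

theorem lead_drop_head (c : Char) (t : List Char) :
    (t.drop (leadCount c t)).head? ≠ some c := by
  induction t with
  | nil => simp
  | cons d t ih =>
    by_cases h : d = c
    · subst h; simpa [leadCount] using ih
    · simp [leadCount, h]

theorem groupby_eq_runsA (l : List Char) : pvGroupby l = runsA l := by
  induction l with
  | nil => simp [pvGroupby, runsA]
  | cons c t ih =>
    have hstep : pvGroupby (c :: t) = pvGrpStep c (pvGroupby t) := rfl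
    rw [hstep, ih]
    cases t with
    | nil => simp [runsA, pvGrpStep, leadCount]
    | cons d t' =>
      by_cases hcd : c = d
      · subst hcd
        rw [runsA, runsA]
        simp only [leadCount]
        simp [pvGrpStep]
      · have hdc : ¬ d = c := fun h => hcd h.symm
        rw [runsA]
        simp [leadCount, hdc, pvGrpStep, hcd, runsA]

theorem runsA_nil_iff (l : List Char) : runsA l = [] ↔ l = [] := by
  cases l with
  | nil => simp [runsA]
  | cons c t => simp [runsA]

theorem capC_not_head (c : Char) (r : Nat) (rest : List Char) (h : rest.head? ≠ some c) :
    capC (some c) r rest = capC none 0 rest := by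
  cases rest with
  | nil => rfl
  | cons d t =>
    have hdc : ¬ some d = some c := by simpa using h
    simp [capC, hdc]

theorem capC_rep (c : Char) (m : Nat) : ∀ (r : Nat) (rest : List Char), rest.head? ≠ some c →
    capC (some c) r (List.replicate m c ++ rest) =
      List.replicate (min m (2 - r)) c ++ capC none 0 rest := by
  induction m with
  | zero =>
    intro r rest h
    simpa using capC_not_head c r rest h
  | succ m ih =>
    intro r rest h
    rw [List.replicate_succ, List.cons_append]
    rw [show capC (some c) r (c :: (List.replicate m c ++ rest)) =
        (if r + 1 ≤ 2 then [c] else []) ++ capC (some c) (r + 1) (List.replicate m c ++ rest)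
      from by simp [capC]]
    rw [ih (r + 1) rest h]
    by_cases hr : r + 1 ≤ 2
    · rw [if_pos hr, show min (m + 1) (2 - r) = min m (2 - (r + 1)) + 1 from by omega,
        List.replicate_succ]
      simp
    · rw [if_neg hr, show min (m + 1) (2 - r) = 0 from by omega,
        show min m (2 - (r + 1)) = 0 from by omega]
      simp

theorem capC_runs (l : List Char) : capC none 0 l = (runsA l).flatMap cap2 := by
  induction l using runsA.induct with
  | case1 => simp [runsA, capC]
  | case2 c t ih =>
    rw [runsA, List.flatMap_cons, ← ih]
    have h1 : capC none 0 (c :: t) = c :: capC (some c) 1 t := by simp [capC]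
    rw [h1]
    conv_lhs => rw [← lead_decomp c t]
    rw [capC_rep c (leadCount c t) 1 _ (lead_drop_head c t)]
    by_cases hk : 2 ≤ leadCount c t
    · rw [show min (leadCount c t) (2 - 1) = 1 from by omega]
      rw [show cap2 (c, (leadCount c t : Int) + 1) = [c, c] from by
        simp only [cap2]
        rw [if_pos (by omega)]]
      simp [List.replicate_succ]
    · rw [show min (leadCount c t) (2 - 1) = leadCount c t from by omega]
      rw [show cap2 (c, (leadCount c t : Int) + 1) = List.replicate (leadCount c t + 1) c from by
        simp only [cap2]
        rw [if_neg (by omega),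
          show ((leadCount c t : Int) + 1).toNat = leadCount c t + 1 from by omega]]
      simp [List.replicate_succ]

theorem runs_rep (l : List Char) :
    (runsA l).flatMap (fun p => List.replicate p.2.toNat p.1) = l := by
  induction l using runsA.induct with
  | case1 => simp [runsA]
  | case2 c t ih =>
    rw [runsA, List.flatMap_cons, ih]
    have : ((leadCount c t : Int) + 1).toNat = leadCount c t + 1 := by omega
    rw [this, List.replicate_succ]
    simp [lead_decomp]

theorem flatMap_cap2_of_le (rs : List (Char × Int)) (h : ∀ p ∈ rs, p.2 ≤ 2) :
    rs.flatMap cap2 = rs.flatMap (fun p => List.replicate p.2.toNat p.1) := by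
  induction rs with
  | nil => rfl
  | cons p t ih =>
    rw [List.flatMap_cons, List.flatMap_cons, ih (fun q hq => h q (List.mem_cons_of_mem _ hq))]
    congr 1
    simp only [cap2]
    rw [if_neg (by have := h p (List.mem_cons_self); omega)]

theorem foldB (l : List Char) : ∀ (out : List Char) (p : Option Char) (r : Nat),
    (l.foldl altStep (out, p, r)).1 = out ++ capC p r l := by
  induction l with
  | nil => intro out p r; simp [capC]
  | cons c t ih =>
    intro out p r
    rw [List.foldl_cons]
    rw [show altStep (out, p, r) c =
        (out ++ (if (if some c = p then r + 1 else 1) ≤ 2 then [c] else []), some c,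
          if some c = p then r + 1 else 1) from rfl]
    rw [ih]
    simp [capC]

theorem alt_single (word : String)
    (h : (PySem.Set.ofList (PySem.Str.lower word).toList).length ≤ 1) :
    correct_char_repetition_alt word = PySem.Str.lower word := by
  unfold correct_char_repetition_alt
  rw [if_pos h]

theorem alt_eq_capC (word : String)
    (h : ¬ (PySem.Set.ofList (PySem.Str.lower word).toList).length ≤ 1) :
    correct_char_repetition_alt word = String.ofList (capC none 0 (PySem.Str.lower word).toList) := by
  unfold correct_char_repetition_alt
  rw [if_neg h, foldB]
  simp

-- a list whose distinct-element set has at most one element has all its members equal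
theorem all_eq_of_card_le_one (l : List Char) (h : (PySem.Set.ofList l).length ≤ 1)
    (x y : Char) (hx : x ∈ l) (hy : y ∈ l) : x = y := by
  have hx' : x ∈ PySem.Set.ofList l := (PySem.Set.mem_ofList l x).mpr hx
  have hy' : y ∈ PySem.Set.ofList l := (PySem.Set.mem_ofList l y).mpr hy
  cases hs : PySem.Set.ofList l with
  | nil => rw [hs] at hx'; cases hx'
  | cons a t =>
    rw [hs] at hx' hy' h
    simp only [List.length_cons] at h
    have ht : t = [] := List.eq_nil_of_length_eq_zero (by omega)
    subst ht
    simp at hx' hy'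
    rw [hx', hy']

-- a nodup list whose members are all equal has at most one element
theorem card_le_one_of_all_eq (s : List Char) (c : Char) (hnd : s.Nodup)
    (h : ∀ x ∈ s, x = c) : s.length ≤ 1 := by
  match s with
  | [] => simp
  | [a] => simp
  | a :: b :: t =>
    exfalso
    have ha : a = c := h a (by simp)
    have hb : b = c := h b (by simp)
    have : a ≠ b := by
      have := List.nodup_cons.mp hnd
      exact fun hab => this.1 (by rw [hab]; simp)
    exact this (ha.trans hb.symm)

theorem leadCount_all_eq (c : Char) (t : List Char) (h : ∀ x ∈ t, x = c) :
    leadCount c t = t.length := by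
  induction t with
  | nil => rfl
  | cons d t ih =>
    have hd : d = c := h d (by simp)
    simp [leadCount, hd, ih (fun x hx => h x (by simp [hx]))]


theorem lower_ne_nil (word : String) (h : word ≠ "") :
    (PySem.Str.lower word).toList ≠ [] := by
  intro hnil
  apply h
  simpa [PySem.Str.toList_lower, PySem.Chars.lower] using hnil

theorem single_run (l : List Char) (h : (runsA l).length = 1) :
    ∃ c, l = List.replicate l.length c ∧ runsA l = [(c, (l.length : Int))] := by
  cases l with
  | nil => simp [runsA] at h
  | cons c t =>
    rw [runsA] at h ⊢
    simp only [List.length_cons] at h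
    have hnil : runsA (t.drop (leadCount c t)) = [] :=
      List.eq_nil_of_length_eq_zero (by omega)
    have hdrop : t.drop (leadCount c t) = [] := (runsA_nil_iff _).mp hnil
    have ht : t = List.replicate (leadCount c t) c := by
      conv_lhs => rw [← lead_decomp c t]
      rw [hdrop, List.append_nil]
    have hlen : leadCount c t = t.length := by
      conv_rhs => rw [ht]
      simp
    refine ⟨c, ?_, ?_⟩
    · conv_lhs => rw [ht]
      simp [List.replicate_succ, hlen]
    · rw [hnil, hlen]
      simp only [List.length_cons]
      push_cast
      simp

-- A's value rewritten through runsA and max?, for the case analysis of the main proof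
theorem A_unfold (word : String) :
    correct_char_repetition word =
      (let w := PySem.Str.lower word
       let occ := runsA w.toList
       if occ.length == 1 then w
       else
         match PySem.List.max? (occ.map (fun p => p.2)) (fun x => x) with
         | none => w
         | some m =>
           if m > 2 then String.ofList (occ.flatMap cap2)
           else w) := by
  unfold correct_char_repetition
  simp only [groupby_eq_runsA,
    show (fun (acc : List Char) (p : Char × Int) =>
        acc ++ (if p.2 > 2 then [p.1, p.1] else List.replicate p.2.toNat p.1)) =
      (fun acc p => acc ++ cap2 p) from rfl,
    PySem.List.foldl_append_eq_flatMap, List.nil_append]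

theorem flatMap_cap2_small (l : List Char) (h : ∀ p ∈ runsA l, p.2 ≤ 2) :
    (runsA l).flatMap cap2 = l := by
  rw [flatMap_cap2_of_le _ h, runs_rep]

-- ===== VERDICT (by name: the statement is the Claim_ definition above) =====
theorem correct_char_repetition_spec : Claim_equal_correct_char_repetition := by
  intro word _hdom hpre
  have hl : (PySem.Str.lower word).toList ≠ [] := lower_ne_nil word hpre
  show correct_char_repetition word = correct_char_repetition_alt word
  by_cases hcard : (PySem.Set.ofList (PySem.Str.lower word).toList).length ≤ 1
  · rw [alt_single word hcard, A_unfold]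
    simp only
    cases hll : (PySem.Str.lower word).toList with
    | nil => exact absurd hll hl
    | cons c t =>
      rw [hll] at hcard
      have hall : ∀ x ∈ (c :: t), x = c := fun x hx =>
        all_eq_of_card_le_one _ hcard x c hx (by simp)
      have hlead : leadCount c t = t.length := leadCount_all_eq c t
        (fun x hx => hall x (by simp [hx]))
      have hruns : runsA (c :: t) = [(c, (t.length : Int) + 1)] := by
        rw [runsA, hlead]
        simp [runsA]
      rw [hruns]
      simp
  · rw [alt_eq_capC word hcard, capC_runs, A_unfold]
    simp only
    by_cases h1 : (runsA (PySem.Str.lower word).toList).length = 1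
    · exfalso
      obtain ⟨c, hrep, _⟩ := single_run _ h1
      apply hcard
      apply card_le_one_of_all_eq _ c (PySem.Set.nodup_ofList _)
      intro x hx
      have hx' : x ∈ (PySem.Str.lower word).toList := (PySem.Set.mem_ofList _ x).mp hx
      rw [hrep] at hx'
      exact List.eq_of_mem_replicate hx'
    · rw [if_neg (by simpa using h1)]
      have hocc : runsA (PySem.Str.lower word).toList ≠ [] := by
        rw [ne_eq, runsA_nil_iff]; exact hl
      cases hm : PySem.List.max? ((runsA (PySem.Str.lower word).toList).map (fun p => p.2)) (fun x => x) with
      | none =>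
        exfalso
        exact hocc (by simpa using (PySem.List.max?_eq_none_iff _ _).mp hm)
      | some m =>
        dsimp only
        by_cases hm2 : m > 2
        · rw [if_pos hm2]
        · rw [if_neg hm2]
          rw [flatMap_cap2_small _ (by
            intro p hp
            have : p.2 ≤ m := PySem.List.max?_isMax hm p.2 (List.mem_map_of_mem hp)
            omega)]
          exact String.ofList_toList.symm
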